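-- pv_equiv track=rewrite | github.com/Veresk24RU/Projekts | Projekts1/Rapot_VTB/HTTP-Req_PORTFOLIO.py | _select_preferred_row
-- ===== SOURCE A (Python) =====
-- from typing import Any, Dict, Iterable, List, Mapping, Sequence, Set, Tuple
--
-- def _normalize_boardid(value: object) -> str:
--     if value is None:
--         return ""
--     return str(value).strip().upper()
--
-- def _select_preferred_row(
--     rows: List[Dict[str, object]],
--     preferred_boardids: List[str],
--     require_engine_market: bool = False,
-- ) -> Dict[str, object] | None:
--     if not rows:
--         return None
--
--     def is_valid(row: Dict[str, object]) -> bool: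
--         if not require_engine_market:
--             return True
--         engine = str(row.get("ENGINE") or row.get("engine") or "").strip()
--         market = str(row.get("MARKET") or row.get("market") or "").strip()
--         return bool(engine and market)
--
--     def matches(row: Dict[str, object], boardid: str) -> bool:
--         return _normalize_boardid(row.get("BOARDID") or row.get("boardid")) == boardid
--
--     for boardid in preferred_boardids:
--         if not boardid:
--             continue
--         for row in rows:
--             if matches(row, boardid) and is_valid(row):
--                 return row
--
--     for row in rows:
--         if is_valid(row):
--             return row
--     return None
-- ===== SOURCE B (Python) =====
-- def _select_preferred_row(rows, preferred_boardids, require_engine_market=False):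
--     # Build one index boardid -> first valid row, plus the first valid row overall,
--     # in a single pass; then answer each preferred boardid by O(1) lookup.
--     def first_truthy(row, *keys):
--         for k in keys:
--             v = row.get(k)
--             if v:
--                 return v
--         return None
--
--     def is_valid(row):
--         if not require_engine_market:
--             return True
--         engine = str(first_truthy(row, "ENGINE", "engine") or "").strip()
--         market = str(first_truthy(row, "MARKET", "market") or "").strip()
--         return bool(engine and market)
--
--     index = {}
--     first_valid = None
--     for row in rows:
--         if not is_valid(row):
--             continue
--         if first_valid is None:
--             first_valid = row
--         raw = first_truthy(row, "BOARDID", "boardid")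
--         key = "" if raw is None else str(raw).strip().upper()
--         if key not in index:
--             index[key] = row
--
--     for boardid in preferred_boardids:
--         if boardid and boardid in index:
--             return index[boardid]
--     return first_valid
-- ===== Notes on version B (the rewrite author's own statement) =====
-- stated objective: faster
-- what changed: Replaces A's nested scans (for each preferred boardid, rescan all rows) with a single pass that builds a dict mapping normalized boardid to the first valid row plus the first valid row overall, then answers each preferred boardid by one dict lookup.
import Mathlib
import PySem

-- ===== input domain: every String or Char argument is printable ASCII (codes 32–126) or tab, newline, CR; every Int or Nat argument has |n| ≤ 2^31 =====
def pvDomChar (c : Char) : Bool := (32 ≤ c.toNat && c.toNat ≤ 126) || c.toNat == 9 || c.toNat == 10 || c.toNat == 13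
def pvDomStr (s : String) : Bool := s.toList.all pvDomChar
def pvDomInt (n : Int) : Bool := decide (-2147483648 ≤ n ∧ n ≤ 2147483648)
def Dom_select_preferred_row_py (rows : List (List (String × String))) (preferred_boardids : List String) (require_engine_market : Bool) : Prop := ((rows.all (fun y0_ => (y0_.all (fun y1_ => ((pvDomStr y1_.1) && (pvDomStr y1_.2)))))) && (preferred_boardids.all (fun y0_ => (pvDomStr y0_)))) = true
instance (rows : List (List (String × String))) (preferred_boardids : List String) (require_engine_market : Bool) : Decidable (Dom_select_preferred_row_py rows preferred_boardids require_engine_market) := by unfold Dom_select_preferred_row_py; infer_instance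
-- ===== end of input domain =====

-- B replaces A's O(P*R) nested scans with one pass that indexes boardid → first valid row
-- plus the first valid row, then answers each preferred boardid by one dict lookup (O(R+P)).

-- ===== PORT A =====
-- row.get(k) on a dict row (association list, first match)
def aGet (row : List (String × String)) (k : String) : Option String :=
  (PySem.Dict.mk row).get? k

-- `row.get(k1) or row.get(k2)` (a string is truthy iff nonempty)
def aOr2 (row : List (String × String)) (k1 k2 : String) : Option String :=
  match aGet row k1 with
  | some v => if v != "" then some v else aGet row k2
  | none => aGet row k2

-- _normalize_boardid(value)
def aNormalize (value : Option String) : String :=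
  match value with
  | none => ""
  | some s => PySem.Str.upper (PySem.Str.strip s)

-- is_valid(row) (closure over require_engine_market)
def aValid (req : Bool) (row : List (String × String)) : Bool :=
  if !req then true
  else
    let engine := PySem.Str.strip ((aOr2 row "ENGINE" "engine").getD "")
    let market := PySem.Str.strip ((aOr2 row "MARKET" "market").getD "")
    (engine != "") && (market != "")

-- matches(row, boardid)
def aMatches (row : List (String × String)) (boardid : String) : Bool :=
  aNormalize (aOr2 row "BOARDID" "boardid") == boardid

-- inner `for row in rows: if matches and is_valid: return row`
def aFindRow (req : Bool) (boardid : String) : List (List (String × String)) → Option (List (String × String))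
  | [] => none
  | r :: rs => if aMatches r boardid && aValid req r then some r else aFindRow req boardid rs

-- outer `for boardid in preferred_boardids`
def aLoopPref (rows : List (List (String × String))) (req : Bool) : List String → Option (List (String × String))
  | [] => none
  | bid :: bs =>
    if bid == "" then aLoopPref rows req bs
    else
      match aFindRow req bid rows with
      | some r => some r
      | none => aLoopPref rows req bs

-- final `for row in rows: if is_valid(row): return row`
def aFirstValid (req : Bool) : List (List (String × String)) → Option (List (String × String))
  | [] => none
  | r :: rs => if aValid req r then some r else aFirstValid req rs

def select_preferred_row_py (rows : List (List (String × String))) (preferred_boardids : List String) (require_engine_market : Bool) : Option (List (String × String)) :=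
  if rows.isEmpty then none
  else
    match aLoopPref rows require_engine_market preferred_boardids with
    | some r => some r
    | none => aFirstValid require_engine_market rows

-- ===== PORT B =====
-- first_truthy(row, *keys)
def bFirstTruthy (row : List (String × String)) : List String → Option String
  | [] => none
  | k :: ks =>
    match (PySem.Dict.mk row).get? k with
    | some v => if v != "" then some v else bFirstTruthy row ks
    | none => bFirstTruthy row ks

-- is_valid(row)
def bValid (req : Bool) (row : List (String × String)) : Bool :=
  if !req then true
  else
    let engine := PySem.Str.strip ((bFirstTruthy row ["ENGINE", "engine"]).getD "")
    let market := PySem.Str.strip ((bFirstTruthy row ["MARKET", "market"]).getD "")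
    (engine != "") && (market != "")

-- key = "" if raw is None else str(raw).strip().upper()
def bKey (row : List (String × String)) : String :=
  match bFirstTruthy row ["BOARDID", "boardid"] with
  | none => ""
  | some raw => PySem.Str.upper (PySem.Str.strip raw)

-- the single indexing pass: carries (index, first_valid)
def bBuild (req : Bool) (d : PySem.Dict String (List (String × String))) (fv : Option (List (String × String))) : List (List (String × String)) → PySem.Dict String (List (String × String)) × Option (List (String × String))
  | [] => (d, fv)
  | r :: rs =>
    if bValid req r then
      let fv' := if fv.isNone then some r else fv
      let d' := if d.contains (bKey r) then d else d.insert (bKey r) r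
      bBuild req d' fv' rs
    else bBuild req d fv rs

-- answer loop: for boardid in preferred_boardids: if boardid and boardid in index: return index[boardid]
def bLoop (d : PySem.Dict String (List (String × String))) (fv : Option (List (String × String))) : List String → Option (List (String × String))
  | [] => fv
  | bid :: bs => if bid != "" && d.contains bid then d.get? bid else bLoop d fv bs

def select_preferred_row_py_alt (rows : List (List (String × String))) (preferred_boardids : List String) (require_engine_market : Bool) : Option (List (String × String)) :=
  let p := bBuild require_engine_market PySem.Dict.empty none rows
  bLoop p.1 p.2 preferred_boardids

-- ===== PRECONDITION & SPEC =====
def Spec_select_preferred_row_py (rows : List (List (String × String))) (preferred_boardids : List String) (require_engine_market : Bool) (out : Option (List (String × String))) : Prop := out = select_preferred_row_py_alt rows preferred_boardids require_engine_market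
instance (rows : List (List (String × String))) (preferred_boardids : List String) (require_engine_market : Bool) (out : Option (List (String × String))) : Decidable (Spec_select_preferred_row_py rows preferred_boardids require_engine_market out) := by unfold Spec_select_preferred_row_py; infer_instance

-- ===== CLAIM (what is proved, stated in full; the proofs are below) =====
def Claim_equal_select_preferred_row_py : Prop := ∀ (rows : List (List (String × String))) (preferred_boardids : List String) (require_engine_market : Bool), Dom_select_preferred_row_py rows preferred_boardids require_engine_market → Spec_select_preferred_row_py rows preferred_boardids require_engine_market (select_preferred_row_py rows preferred_boardids require_engine_market)

-- ===== LEMMAS AND PROOFS =====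

theorem bValid_eq_aValid (req : Bool) (row : List (String × String)) :
    bValid req row = aValid req row := by
  unfold bValid aValid bFirstTruthy aOr2 aGet
  cases h1 : (PySem.Dict.mk row).get? "ENGINE" <;>
  cases h2 : (PySem.Dict.mk row).get? "engine" <;>
  cases h3 : (PySem.Dict.mk row).get? "MARKET" <;>
  cases h4 : (PySem.Dict.mk row).get? "market" <;>
  simp [bFirstTruthy, h2, h4] <;> split_ifs <;> simp_all

theorem bKey_eq_aNorm (row : List (String × String)) :
    bKey row = aNormalize (aOr2 row "BOARDID" "boardid") := by
  unfold bKey aNormalize aOr2 aGet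
  cases h1 : (PySem.Dict.mk row).get? "BOARDID" <;>
  cases h2 : (PySem.Dict.mk row).get? "boardid" <;>
  simp [bFirstTruthy, h1, h2] <;> split_ifs <;> simp_all <;> rfl

theorem bBuild_get (req : Bool) (rows : List (List (String × String))) :
    ∀ (d : PySem.Dict String (List (String × String))) (fv : Option (List (String × String))) (k : String),
      ((bBuild req d fv rows).1).get? k =
        match d.get? k with
        | some v => some v
        | none => aFindRow req k rows := by
  induction rows with
  | nil => intro d fv k; cases h : d.get? k <;> simp [bBuild, aFindRow, h]
  | cons r rs ih =>
    intro d fv k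
    by_cases hv : bValid req r = true
    · simp only [bBuild, hv, if_true]
      by_cases hc : d.contains (bKey r) = true
      · simp only [hc, if_true]
        rw [ih]
        cases h : d.get? k with
        | some v => rfl
        | none =>
          have hk : k ≠ bKey r := by
            intro he
            rw [PySem.Dict.contains_eq_isSome_get?] at hc
            rw [← he, h] at hc; simp at hc
          simp only [aFindRow]
          have : aMatches r k = false := by
            simp [aMatches, ← bKey_eq_aNorm]
            intro he; exact hk he.symm
          simp [this]
      · rw [if_neg hc]
        rw [ih]
        rw [PySem.Dict.get?_insert]
        by_cases hk : k = bKey r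
        · subst hk
          rw [PySem.Dict.contains_eq_isSome_get?] at hc
          cases h : d.get? (bKey r) with
          | some v => rw [h] at hc; simp at hc
          | none =>
            simp only [aFindRow]
            have hm : aMatches r (bKey r) = true := by
              simp [aMatches, ← bKey_eq_aNorm]
            have hv' : aValid req r = true := by rw [← bValid_eq_aValid]; exact hv
            simp [hm, hv']
        · rw [if_neg hk]
          cases h : d.get? k with
          | some v => rfl
          | none =>
            simp only [aFindRow]
            have : aMatches r k = false := by
              simp [aMatches, ← bKey_eq_aNorm]
              intro he; exact hk he.symm
            simp [this]
    · simp only [bBuild, hv]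
      rw [if_neg (by simp [hv]), ih]
      cases h : d.get? k with
      | some v => rfl
      | none =>
        simp only [aFindRow]
        have : aValid req r = false := by rw [← bValid_eq_aValid]; simpa using hv
        simp [this]

theorem bBuild_fv (req : Bool) (rows : List (List (String × String))) :
    ∀ (d : PySem.Dict String (List (String × String))) (fv : Option (List (String × String))),
      (bBuild req d fv rows).2 =
        match fv with
        | some v => some v
        | none => aFirstValid req rows := by
  induction rows with
  | nil => intro d fv; cases fv <;> simp [bBuild, aFirstValid]
  | cons r rs ih =>
    intro d fv
    by_cases hv : bValid req r = true
    · simp only [bBuild, hv, if_true]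
      rw [ih]
      cases fv with
      | some v => simp
      | none =>
        simp only [aFirstValid, Option.isNone_none, if_true]
        rw [bValid_eq_aValid] at hv
        simp [hv]
    · simp only [bBuild, hv]
      rw [if_neg (by simp [hv]), ih]
      cases fv with
      | some v => rfl
      | none =>
        simp only [aFirstValid]
        have : aValid req r = false := by rw [← bValid_eq_aValid]; simpa using hv
        simp [this]

theorem bLoop_eq (rows : List (List (String × String))) (req : Bool)
    (d : PySem.Dict String (List (String × String))) (fv : Option (List (String × String)))
    (hd : ∀ k, d.get? k = aFindRow req k rows)
    (hf : fv = aFirstValid req rows) :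
    ∀ pref : List String,
      bLoop d fv pref =
        match aLoopPref rows req pref with
        | some r => some r
        | none => aFirstValid req rows := by
  intro pref
  induction pref with
  | nil => simp [bLoop, aLoopPref, hf]
  | cons bid bs ih =>
    simp only [bLoop, aLoopPref]
    by_cases hb : bid = ""
    · subst hb; simpa using ih
    · have hc : d.contains bid = (aFindRow req bid rows).isSome := by
        rw [PySem.Dict.contains_eq_isSome_get?, hd]
      cases h : aFindRow req bid rows with
      | some r =>
        rw [if_pos (by simp [hb, hc, h]), hd, h]
        simp [hb]
      | none =>
        rw [if_neg (by simp [hc, h])]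
        simp [hb, ih]

theorem aLoopPref_nil (req : Bool) : ∀ pref, aLoopPref [] req pref = none := by
  intro pref
  induction pref with
  | nil => rfl
  | cons bid bs ih => simp only [aLoopPref, aFindRow]; split_ifs <;> simp [ih]

-- ===== VERDICT (by name: the statement is the Claim_ definition above) =====
theorem select_preferred_row_py_spec : Claim_equal_select_preferred_row_py := by
  intro rows pref req _
  have halt : select_preferred_row_py_alt rows pref req =
      bLoop (bBuild req PySem.Dict.empty none rows).1 (bBuild req PySem.Dict.empty none rows).2 pref := rfl
  have hmain :
      bLoop (bBuild req PySem.Dict.empty none rows).1 (bBuild req PySem.Dict.empty none rows).2 pref =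
        match aLoopPref rows req pref with
        | some r => some r
        | none => aFirstValid req rows := by
    apply bLoop_eq
    · intro k
      rw [bBuild_get]
      simp [PySem.Dict.get?_empty]
    · rw [bBuild_fv]
  unfold Spec_select_preferred_row_py
  rw [halt, hmain]
  unfold select_preferred_row_py
  by_cases he : rows.isEmpty = true
  · have hnil : rows = [] := List.isEmpty_iff.mp he
    subst hnil
    rw [if_pos he, aLoopPref_nil]
    rfl
  · rw [if_neg he]
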